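-- pv_equiv track=rewrite | github.com/Adamtaranto/mpg | genseq.py | iter_kmers
-- ===== SOURCE A (Python) =====
-- def ntnum(nt):
--     '''Nucleotide to number: A: 0, C: 1, G:2, T: 3.
--
--     Case insensitive.
--     '''
--     n = (ord(nt) & 6) >> 1
--     n ^= n>>1
--     return n
--
-- def iter_kmers(seq, k):
--     '''Iterator over hashed k-mers in a string DNA sequence.
--     '''
--     bitmask = 2**(2*k)-1  # Set lowest 2*k bits
--     h = 0
--
--     # Pre-load the first k-1 nucleotides into the hash value
--     for nt in seq[:k-1]:
--         h = (h << 2) | ntnum(nt)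
--     # For each kmer's end nucleotide, bit-shift, add the end and yield
--     for end in range(k-1, len(seq)):
--         h = ((h << 2) | ntnum(seq[end])) & bitmask
--         yield h
-- ===== SOURCE B (Python) =====
-- def ntnum(nt):
--     '''Nucleotide to number: A: 0, C: 1, G:2, T: 3. Case insensitive.'''
--     n = (ord(nt) & 6) >> 1
--     n ^= n >> 1
--     return n
--
-- def iter_kmers(seq, k):
--     '''Iterator over hashed k-mers: each window hashed independently.'''
--     bitmask = 2**(2*k) - 1
--     for i in range(len(seq) - k + 1):
--         h = 0
--         for nt in seq[i:i+k]:
--             h = (h << 2) | ntnum(nt)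
--         yield h & bitmask
-- ===== Notes on version B (the rewrite author's own statement) =====
-- stated objective: alternative
-- what changed: A maintains one incremental rolling hash (preload of k-1 bases, then slide and mask); B has no rolling state: for each window start i it re-folds the k-character slice seq[i:i+k] from zero and masks, trading the O(n) incremental scan for an independent per-window recomputation (O(n*k)).
-- crash fix: On seq == '' with k == 0 A raises IndexError (seq[-1] on the empty string) while B returns [0], the masked hash of the single empty window; Pre_ also excludes k < 0, where both A and B raise TypeError (int & float bitmask). — e.g. on iter_kmers("", 0): A raises IndexError, B returns [0]
import Mathlib
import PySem

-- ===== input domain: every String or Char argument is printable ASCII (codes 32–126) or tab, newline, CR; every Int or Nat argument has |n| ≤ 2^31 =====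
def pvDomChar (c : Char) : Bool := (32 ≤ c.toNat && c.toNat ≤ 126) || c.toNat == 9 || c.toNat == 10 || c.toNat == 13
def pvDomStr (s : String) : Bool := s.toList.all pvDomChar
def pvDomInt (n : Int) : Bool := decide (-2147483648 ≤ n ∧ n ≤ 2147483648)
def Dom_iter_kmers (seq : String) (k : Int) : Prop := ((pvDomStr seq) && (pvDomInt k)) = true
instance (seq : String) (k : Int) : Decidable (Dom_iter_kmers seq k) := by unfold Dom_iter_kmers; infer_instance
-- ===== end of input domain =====

-- B re-hashes every k-window independently from scratch instead of A's incremental rolling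
-- hash (an alternative decomposition, not faster); return values only — both Pythons are
-- generators, compared as the list of yielded values.


-- ===== PORT A =====
-- n = (ord(nt) & 6) >> 1; n ^= n >> 1 — every value is a nonnegative int, computed in Nat and cast
def ntnum (nt : Char) : Int :=
  ((((nt.toNat &&& 6) >>> 1) ^^^ (((nt.toNat &&& 6) >>> 1) >>> 1) : Nat) : Int)

-- body of A's yield loop: h = ((h << 2) | ntnum(seq[end])) & bitmask; yield h
-- (seq[end] is in range on every input Pre_ admits, so the pyGetD default is never read)
def stepA (cs : List Char) (bitmask : Int) (st : Int × List Int) (e : Int) : Int × List Int :=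
  let h := PySem.Int.band (PySem.Int.bor (st.1 <<< (2 : Nat)) (ntnum (PySem.List.pyGetD cs e 'A'))) bitmask
  (h, st.2 ++ [h])

def iter_kmers (seq : String) (k : Int) : List Int :=
  let cs := seq.toList
  -- bitmask = 2**(2*k)-1 : exact for k ≥ 0; Pre_ excludes k < 0 (Python raises TypeError there)
  let bitmask : Int := 2 ^ (2 * k).toNat - 1
  -- for nt in seq[:k-1]: h = (h << 2) | ntnum(nt)
  let h0 : Int := (PySem.List.slice cs none (some (k - 1))).foldl
      (fun h nt => PySem.Int.bor (h <<< (2 : Nat)) (ntnum nt)) 0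
  -- for end in range(k-1, len(seq)): h = ((h << 2) | ntnum(seq[end])) & bitmask; yield h
  ((PySem.List.pyRange (k - 1) (PySem.Str.len seq) 1).foldl (stepA cs bitmask) (h0, [])).2

-- ===== PORT B =====
def ntnum_b (nt : Char) : Int :=
  ((((nt.toNat &&& 6) >>> 1) ^^^ (((nt.toNat &&& 6) >>> 1) >>> 1) : Nat) : Int)

def iter_kmers_alt (seq : String) (k : Int) : List Int :=
  let cs := seq.toList
  let bitmask : Int := 2 ^ (2 * k).toNat - 1
  -- for i in range(len(seq)-k+1): fold the window seq[i:i+k] from scratch, yield h & bitmask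
  (PySem.List.pyRange 0 (PySem.Str.len seq - k + 1) 1).map (fun i =>
    PySem.Int.band
      ((PySem.List.slice cs (some i) (some (i + k))).foldl
        (fun h nt => PySem.Int.bor (h <<< (2 : Nat)) (ntnum_b nt)) 0)
      bitmask)

-- ===== PRECONDITION & SPEC =====
-- Pre_ excludes exactly the inputs where Python A raises: k < 0 (TypeError: the bitmask
-- 2**(2*k)-1 is a float, h & bitmask fails) and k = 0 with empty seq (IndexError: seq[-1]).
def Pre_iter_kmers (seq : String) (k : Int) : Prop := 1 ≤ k ∨ (k = 0 ∧ seq ≠ "")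
instance (seq : String) (k : Int) : Decidable (Pre_iter_kmers seq k) := by
  unfold Pre_iter_kmers; infer_instance

def pvWitness_iter_kmers : String × Int := ("ACGTACGT", 3)

-- On seq == "" with k == 0, A raises IndexError (seq[-1] on the empty string); B returns [0],
-- the masked hash of the single empty window.
def Raises_iter_kmers (seq : String) (k : Int) : Prop := k = 0 ∧ seq = ""
instance (seq : String) (k : Int) : Decidable (Raises_iter_kmers seq k) := by
  unfold Raises_iter_kmers; infer_instance
def pvRaiseWitness_iter_kmers : String × Int := ("", 0)
def pvRaiseWitnessOut_iter_kmers : List Int := [0]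

def Spec_iter_kmers (seq : String) (k : Int) (out : List Int) : Prop := out = iter_kmers_alt seq k
instance (seq : String) (k : Int) (out : List Int) : Decidable (Spec_iter_kmers seq k out) := by
  unfold Spec_iter_kmers; infer_instance

-- ===== CLAIM (what is proved, stated in full; the proofs are below) =====
def Claim_equal_iter_kmers : Prop := ∀ (seq : String) (k : Int), Dom_iter_kmers seq k → Pre_iter_kmers seq k → Spec_iter_kmers seq k (iter_kmers seq k)
def Claim_raises_iter_kmers : Prop := (∀ (seq : String) (k : Int), Dom_iter_kmers seq k → Raises_iter_kmers seq k → ¬ Pre_iter_kmers seq k) ∧ (Dom_iter_kmers (pvRaiseWitness_iter_kmers.1) (pvRaiseWitness_iter_kmers.2) ∧ Raises_iter_kmers (pvRaiseWitness_iter_kmers.1) (pvRaiseWitness_iter_kmers.2) ∧ iter_kmers_alt (pvRaiseWitness_iter_kmers.1) (pvRaiseWitness_iter_kmers.2) = pvRaiseWitnessOut_iter_kmers)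

-- ===== LEMMAS AND PROOFS =====

-- the Nat value of one nucleotide and of a base-4 digit string (proof-side mirrors)
def dN (c : Char) : Nat :=
  ((c.toNat &&& 6) >>> 1) ^^^ (((c.toNat &&& 6) >>> 1) >>> 1)

def valN (l : List Char) : Nat := l.foldl (fun h c => 4 * h + dN c) 0

lemma ntnum_eq (c : Char) : ntnum c = ((dN c : Nat) : Int) := rfl
lemma ntnum_b_eq (c : Char) : ntnum_b c = ((dN c : Nat) : Int) := rfl

lemma dN_lt (c : Char) : dN c < 4 := by
  have h6 : c.toNat &&& 6 ≤ 6 := Nat.and_le_right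
  have hn : (c.toNat &&& 6) >>> 1 < 4 := by
    rw [Nat.shiftRight_eq_div_pow]; omega
  have hs : ((c.toNat &&& 6) >>> 1) >>> 1 < 4 := by
    rw [Nat.shiftRight_eq_div_pow, Nat.shiftRight_eq_div_pow]; omega
  have := Nat.xor_lt_two_pow (n := 2) hn hs
  simpa using this

lemma or_step (h d : Nat) (hd : d < 4) : (h <<< 2) ||| d = 4 * h + d := by
  have h1 : h <<< 2 + d = h <<< 2 ||| d := Nat.shiftLeft_add_eq_or_of_lt hd h
  rw [← h1, Nat.shiftLeft_eq]; ring

lemma cast_pow_sub_one (m : Nat) : ((2 : Int) ^ m - 1) = (((2 ^ m - 1 : Nat)) : Int) := by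
  have h : (1 : Nat) ≤ 2 ^ m := Nat.one_le_two_pow
  rw [Nat.cast_sub h]; push_cast; ring

lemma band_mask (v m : Nat) :
    PySem.Int.band ((v : Nat) : Int) ((2 : Int) ^ m - 1) = (((v % 2 ^ m : Nat)) : Int) := by
  rw [cast_pow_sub_one, PySem.Int.band_natCast, Nat.and_two_pow_sub_one_eq_mod]

lemma bor_cast (a d : Nat) (hd : d < 4) :
    PySem.Int.bor (((a : Nat) : Int) <<< (2 : Nat)) ((d : Nat) : Int) = (((4 * a + d : Nat)) : Int) := by
  rw [← Int.natCast_shiftLeft, PySem.Int.bor_natCast, or_step a d hd]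

lemma int_step (a d m : Nat) (hd : d < 4) :
    PySem.Int.band (PySem.Int.bor (((a : Nat) : Int) <<< (2 : Nat)) ((d : Nat) : Int)) ((2 : Int) ^ m - 1)
      = ((((4 * a + d) % 2 ^ m : Nat)) : Int) := by
  rw [bor_cast a d hd, band_mask]

lemma fold_cast (f : Char → Int) (hf : ∀ c, f c = ((dN c : Nat) : Int)) :
    ∀ (l : List Char) (a : Nat),
    l.foldl (fun h nt => PySem.Int.bor (h <<< (2 : Nat)) (f nt)) ((a : Nat) : Int)
      = ((l.foldl (fun h c => 4 * h + dN c) a : Nat) : Int) := by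
  intro l
  induction l with
  | nil => intro a; simp
  | cons c t ih =>
    intro a
    simp only [List.foldl_cons]
    rw [hf, bor_cast a (dN c) (dN_lt c)]
    exact ih (4 * a + dN c)

lemma fold_cast0 (f : Char → Int) (hf : ∀ c, f c = ((dN c : Nat) : Int)) (l : List Char) :
    l.foldl (fun h nt => PySem.Int.bor (h <<< (2 : Nat)) (f nt)) 0 = ((valN l : Nat) : Int) := by
  have h2 := fold_cast f hf l 0
  rw [Nat.cast_zero] at h2
  exact h2

lemma val_from : ∀ (l : List Char) (a : Nat),
    l.foldl (fun h c => 4 * h + dN c) a = a * 4 ^ l.length + valN l := by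
  intro l
  induction l with
  | nil => intro a; simp [valN]
  | cons c t ih =>
    intro a
    simp only [List.foldl_cons, List.length_cons]
    rw [ih (4 * a + dN c)]
    have hv : valN (c :: t) = dN c * 4 ^ t.length + valN t := by
      simp only [valN, List.foldl_cons]
      have := ih (4 * 0 + dN c)
      simpa using this
    rw [hv]; ring

lemma valN_append (a b : List Char) : valN (a ++ b) = valN a * 4 ^ b.length + valN b := by
  simp only [valN, List.foldl_append]
  exact val_from b _

lemma valN_singleton (c : Char) : valN [c] = dN c := by simp [valN]

lemma valN_lt (l : List Char) : valN l < 4 ^ l.length := by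
  induction l with
  | nil => simp [valN]
  | cons c t ih =>
    have hv : valN (c :: t) = dN c * 4 ^ t.length + valN t := by
      simp only [valN, List.foldl_cons]
      simpa using val_from t (4 * 0 + dN c)
    rw [hv, List.length_cons, pow_succ]
    have hd := dN_lt c
    nlinarith [pow_pos (show (0:Nat) < 4 by norm_num) t.length]

-- A's yield loop: starting from the running hash of cs[:j] (mod 4^k'), folding the indices
-- j, j+1, …, j+m-1 appends the masked hashes of all prefixes cs[:j+t+1]
lemma loopA (cs : List Char) (k' : Nat) :
    ∀ (m j : Nat) (out : List Int), j + m ≤ cs.length →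
    ((List.range m).map (fun t : Nat => ((j : Int) + (t : Int)))).foldl
        (stepA cs ((2 : Int) ^ (2 * k') - 1))
        ((((valN (cs.take j) % 2 ^ (2 * k') : Nat)) : Int), out)
      = ((((valN (cs.take (j + m)) % 2 ^ (2 * k') : Nat)) : Int),
         out ++ (List.range m).map
           (fun t : Nat => (((valN (cs.take (j + t + 1)) % 2 ^ (2 * k') : Nat)) : Int))) := by
  intro m
  induction m with
  | zero => intro j out _; simp
  | succ m ih =>
    intro j out h
    rw [List.range_succ, List.map_append, List.foldl_append, ih j out (by omega)]
    have hjm : j + m < cs.length := by omega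
    simp only [List.map_cons, List.map_nil, List.foldl_cons, List.foldl_nil]
    unfold stepA
    have hidx : ((j : Int) + (m : Int)) = (((j + m : Nat)) : Int) := by push_cast; ring
    rw [hidx, PySem.List.pyGetD_natCast, List.getD_eq_getElem cs 'A' hjm, ntnum_eq,
      int_step _ _ _ (dN_lt _)]
    have hval : (4 * (valN (cs.take (j + m)) % 2 ^ (2 * k')) + dN (cs[j + m])) % 2 ^ (2 * k')
        = valN (cs.take (j + m + 1)) % 2 ^ (2 * k') := by
      have hmod : (4 * (valN (cs.take (j + m)) % 2 ^ (2 * k')) + dN (cs[j + m])) % 2 ^ (2 * k')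
          = (4 * valN (cs.take (j + m)) + dN (cs[j + m])) % 2 ^ (2 * k') :=
        ((Nat.mod_modEq _ _).mul_left 4).add_right _
      have htake : cs.take (j + m + 1) = cs.take (j + m) ++ [cs[j + m]] := by
        rw [List.take_add_one, List.getElem?_eq_getElem hjm]
        rfl
      rw [hmod, htake, valN_append, valN_singleton]
      congr 1
      simp
      ring
    rw [hval, List.map_append, ← List.append_assoc]
    rfl

-- one element of B: the masked hash of the window cs[t:t+k'] is the masked hash of cs[:t+k']
lemma altElem (cs : List Char) (k' t : Nat) (h : t + k' ≤ cs.length) :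
    PySem.Int.band
        ((PySem.List.slice cs (some (t : Int)) (some ((t : Int) + (k' : Int)))).foldl
          (fun h nt => PySem.Int.bor (h <<< (2 : Nat)) (ntnum_b nt)) 0)
        ((2 : Int) ^ (2 * k') - 1)
      = (((valN (cs.take (t + k')) % 2 ^ (2 * k') : Nat)) : Int) := by
  rw [PySem.List.slice_natCast_add, fold_cast0 ntnum_b ntnum_b_eq, band_mask]
  congr 1
  have htake : cs.take (t + k') = cs.take t ++ (cs.drop t).take k' := List.take_add
  have hlen : ((cs.drop t).take k').length = k' := by
    rw [List.length_take, List.length_drop]; omega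
  rw [htake, valN_append, hlen,
    show (2 : Nat) ^ (2 * k') = 4 ^ k' by rw [two_mul, pow_add, ← mul_pow]; norm_num,
    add_comm (valN (cs.take t) * 4 ^ k'), Nat.add_mul_mod_self_right]

-- the k = 0 mask: every yielded value is h & 0 = 0
lemma foldl_zero_pairs :
    ∀ (L : List Int) (h : Int) (out : List Int),
    (L.foldl (fun (st : Int × List Int) (_ : Int) => ((0 : Int), st.2 ++ [(0 : Int)])) (h, out)).2
      = out ++ List.replicate L.length 0 := by
  intro L
  induction L with
  | nil => intro h out; simp
  | cons e t ih =>
    intro h out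
    simp only [List.foldl_cons, List.length_cons]
    rw [ih 0 (out ++ [0])]
    simp [List.replicate_succ]

lemma loopA_zero (cs : List Char) (L : List Int) (h : Int) (out : List Int) :
    (L.foldl (stepA cs 0) (h, out)).2 = out ++ List.replicate L.length 0 := by
  have hfe : stepA cs 0 = fun (st : Int × List Int) (_ : Int) => ((0 : Int), st.2 ++ [(0 : Int)]) := by
    funext st e
    simp [stepA]
  rw [hfe]
  exact foldl_zero_pairs L h out

lemma map_band_zero (g : Int → Int) :
    ∀ (l : List Int), l.map (fun i => PySem.Int.band (g i) 0) = List.replicate l.length 0 := by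
  intro l
  induction l with
  | nil => simp
  | cons x t _ => simp [List.replicate_succ]

-- ===== VERDICT (by name: the statement is the Claim_ definition above) =====
theorem iter_kmers_spec : Claim_equal_iter_kmers := by
  intro seq k _ hpre
  unfold Spec_iter_kmers
  have hb : PySem.Str.len seq = ((seq.toList.length : Nat) : Int) := by simp [pysem]
  rcases hpre with hk | ⟨hk0, hne⟩
  · -- k ≥ 1
    lift k to Nat using (by omega : (0:Int) ≤ k) with k'
    have hk1 : 1 ≤ k' := by exact_mod_cast hk
    simp only [iter_kmers, iter_kmers_alt]
    rw [hb]
    have e1 : (2 * (k' : Int)).toNat = 2 * k' := by omega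
    have e2 : ((k' : Int) - 1) = (((k' - 1 : Nat)) : Int) := by omega
    rw [e1, e2, PySem.List.slice_to_natCast, fold_cast0 ntnum ntnum_eq,
      PySem.List.pyRange_one, PySem.List.pyRange_one]
    set cs := seq.toList with hcs
    have hm : (((cs.length : Nat) : Int) - (((k' - 1 : Nat)) : Int)).toNat
        = (((cs.length : Nat) : Int) - (k' : Int) + 1 - 0).toNat := by omega
    rw [hm]
    set m := (((cs.length : Nat) : Int) - (k' : Int) + 1 - 0).toNat with hmdef
    by_cases h0 : m = 0
    · simp [h0]
    · have hmn : k' - 1 + m ≤ cs.length := by omega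
      have hpre2 : valN (cs.take (k' - 1)) = valN (cs.take (k' - 1)) % 2 ^ (2 * k') := by
        have hlt := valN_lt (cs.take (k' - 1))
        have hle : 4 ^ (cs.take (k' - 1)).length ≤ 2 ^ (2 * k') := by
          rw [show (2 : Nat) ^ (2 * k') = 4 ^ k' by rw [two_mul, pow_add, ← mul_pow]; norm_num]
          exact Nat.pow_le_pow_right (by norm_num) (by rw [List.length_take]; omega)
        exact (Nat.mod_eq_of_lt (lt_of_lt_of_le hlt hle)).symm
      rw [hpre2, loopA cs k' m (k' - 1) [] hmn]
      rw [List.map_map]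
      simp only [List.nil_append]
      apply List.map_congr_left
      intro t ht
      have htm : t < m := List.mem_range.mp ht
      have htk : t + k' ≤ cs.length := by omega
      simp only [Function.comp_apply, zero_add]
      rw [show k' - 1 + t + 1 = t + k' by omega]
      exact (altElem cs k' t htk).symm
  · -- k = 0, seq ≠ ""
    subst hk0
    simp only [iter_kmers, iter_kmers_alt]
    rw [hb]
    rw [show ((2 : Int) ^ (2 * (0 : Int)).toNat - 1) = 0 by norm_num]
    rw [loopA_zero, map_band_zero, PySem.List.length_pyRange_one,
      PySem.List.length_pyRange_one]
    simp only [List.nil_append]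
    congr 1

@[simp]
theorem iter_kmers_raises : Claim_raises_iter_kmers := by
  unfold Claim_raises_iter_kmers
  constructor
  · intro seq k _ hr hp
    rcases hr with ⟨hk, hs⟩
    rcases hp with h | ⟨_, hne⟩
    · omega
    · exact hne hs
  · exact ⟨by decide, by decide, by decide⟩
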